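-- pv_equiv track=rewrite | github.com/DansiDanutz/ZmartBot | zmart-api/gpt_mds_agent.py | extract_docstrings
-- ===== SOURCE A (Python) =====
-- from typing import Dict, List, Optional
--
-- def extract_docstrings(content: str) -> List[str]:
--     """Extract docstrings"""
--     docstrings = []
--     lines = content.split('\n')
--
--     in_docstring = False
--     current_docstring = []
--
--     for line in lines:
--         stripped = line.strip()
--         if '"""' in stripped:
--             if in_docstring:
--                 current_docstring.append(line)
--                 docstrings.append('\n'.join(current_docstring))
--                 current_docstring = []
--                 in_docstring = False
--             else:
--                 current_docstring = [line]
--                 in_docstring = True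
--         elif in_docstring:
--             current_docstring.append(line)
--
--     return docstrings
-- ===== SOURCE B (Python) =====
-- def extract_docstrings(content: str):
--     """Extract docstrings (index-pairing reformulation)."""
--     lines = content.split('\n')
--     marker_idxs = [i for i, line in enumerate(lines) if '"""' in line.strip()]
--     blocks = []
--     for k in range(0, len(marker_idxs) - 1, 2):
--         start, end = marker_idxs[k], marker_idxs[k + 1]
--         blocks.append('\n'.join(lines[start:end + 1]))
--     return blocks
-- ===== Notes on version B (the rewrite author's own statement) =====
-- stated objective: alternative
-- what changed: Replaced A's single-pass boolean state machine (in_docstring flag plus accumulated current block) with a two-phase decomposition: collect the indices of all marker lines, then pair consecutive indices two at a time and slice-and-join lines[start:end+1] for each pair, dropping an unpaired trailing marker.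
import Mathlib
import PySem

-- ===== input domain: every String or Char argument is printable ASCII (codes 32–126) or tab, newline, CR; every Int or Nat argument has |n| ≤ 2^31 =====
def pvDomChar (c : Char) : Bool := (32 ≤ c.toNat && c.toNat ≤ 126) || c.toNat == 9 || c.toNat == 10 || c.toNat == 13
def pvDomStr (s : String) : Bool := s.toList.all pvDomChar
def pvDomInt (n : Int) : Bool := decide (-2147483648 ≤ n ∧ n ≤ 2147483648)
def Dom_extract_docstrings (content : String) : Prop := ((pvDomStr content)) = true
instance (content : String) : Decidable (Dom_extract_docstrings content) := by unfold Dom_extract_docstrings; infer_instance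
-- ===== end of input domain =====

-- B re-implements docstring-block extraction by a different decomposition: one pass collecting
-- marker-line indices, then pairing consecutive indices and slicing/joining; same cost as A.


-- ===== PORT A =====
-- state = (docstrings, in_docstring, current_docstring); '.getD []' only discharges the
-- impossible 'none' of split? (separator "\n" is nonempty, so Python's split never raises).
def extract_docstrings (content : String) : List String :=
  let lines := (PySem.Str.split? content "\n").getD []
  (lines.foldl
    (fun (st : List String × Bool × List String) line =>
      let stripped := PySem.Str.strip line
      if PySem.Str.isIn "\"\"\"" stripped then
        if st.2.1 then
          (st.1 ++ [PySem.Str.join "\n" (st.2.2 ++ [line])], false, ([] : List String))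
        else
          (st.1, true, [line])
      else if st.2.1 then
        (st.1, st.2.1, st.2.2 ++ [line])
      else st)
    ([], false, [])).1

-- ===== PORT B =====
-- the 'for k in range(0, len(idxs)-1, 2)' pairing loop, two indices at a time
mutual
def pvPairUp (lines : List String) : List Int → List String
  | [] => []
  | s :: idxs => pvAwait lines s idxs
def pvAwait (lines : List String) (s : Int) : List Int → List String
  | [] => []
  | e :: rest =>
      PySem.Str.join "\n" (PySem.List.slice lines (some s) (some (e + 1))) :: pvPairUp lines rest
end

def extract_docstrings_alt (content : String) : List String :=
  let lines := (PySem.Str.split? content "\n").getD []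
  let markerIdxs := (PySem.List.enumerate lines).filterMap
    (fun q => if PySem.Str.isIn "\"\"\"" (PySem.Str.strip q.2) then some q.1 else none)
  pvPairUp lines markerIdxs

-- ===== PRECONDITION & SPEC =====
def Spec_extract_docstrings (content : String) (out : List String) : Prop := out = extract_docstrings_alt content
instance (content : String) (out : List String) : Decidable (Spec_extract_docstrings content out) := by unfold Spec_extract_docstrings; infer_instance

-- ===== CLAIM (what is proved, stated in full; the proofs are below) =====
def Claim_equal_extract_docstrings : Prop := ∀ (content : String), Dom_extract_docstrings content → Spec_extract_docstrings content (extract_docstrings content)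

-- ===== LEMMAS AND PROOFS =====

-- reference characterisation: pvGo1 scans for an opening marker line, pvGo2 collects until the closer
mutual
def pvGo1 (p : String → Bool) : List String → List String
  | [] => []
  | l :: ls => if p l then pvGo2 p [l] ls else pvGo1 p ls
def pvGo2 (p : String → Bool) (acc : List String) : List String → List String
  | [] => []
  | l :: ls =>
      if p l then PySem.Str.join "\n" (acc ++ [l]) :: pvGo1 p ls else pvGo2 p (acc ++ [l]) ls
end

-- absolute indices (from i) of the lines satisfying p
def pvIdxs (p : String → Bool) (i : Int) : List String → List Int
  | [] => []
  | l :: ls => if p l then i :: pvIdxs p (i + 1) ls else pvIdxs p (i + 1) ls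

theorem pvFilterMap_enumerate (p : String → Bool) (ls : List String) (i : Int) :
    (PySem.List.enumerate ls i).filterMap (fun q => if p q.2 then some q.1 else none)
      = pvIdxs p i ls := by
  induction ls generalizing i with
  | nil => simp [PySem.List.enumerate_nil, pvIdxs]
  | cons l ls ih =>
      simp only [PySem.List.enumerate_cons, List.filterMap_cons, pvIdxs]
      by_cases h : p l <;> simp [h, ih]

theorem pvTakeLenSucc {α : Type} (as : List α) (l : α) (bs : List α) :
    (as ++ l :: bs).take (as.length + 1) = as ++ [l] := by
  induction as with
  | nil => simp
  | cons a as ih => simp [ih]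

-- A's fold equals the reference characterisation
theorem pvFoldChar (p : String → Bool) (ls : List String) :
    (∀ docs : List String, ∀ cur : List String,
      (ls.foldl
        (fun (st : List String × Bool × List String) line =>
          if p line then
            if st.2.1 then
              (st.1 ++ [PySem.Str.join "\n" (st.2.2 ++ [line])], false, ([] : List String))
            else (st.1, true, [line])
          else if st.2.1 then (st.1, st.2.1, st.2.2 ++ [line])
          else st)
        (docs, false, cur)).1 = docs ++ pvGo1 p ls)
    ∧ (∀ docs acc : List String,
      (ls.foldl
        (fun (st : List String × Bool × List String) line =>
          if p line then
            if st.2.1 then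
              (st.1 ++ [PySem.Str.join "\n" (st.2.2 ++ [line])], false, ([] : List String))
            else (st.1, true, [line])
          else if st.2.1 then (st.1, st.2.1, st.2.2 ++ [line])
          else st)
        (docs, true, acc)).1 = docs ++ pvGo2 p acc ls) := by
  induction ls with
  | nil => simp [pvGo1, pvGo2]
  | cons l ls ih =>
      constructor
      · intro docs cur
        by_cases h : p l
        · simp only [List.foldl_cons, h, if_true, pvGo1]
          simpa [h] using ih.2 docs [l]
        · simp only [List.foldl_cons, h, pvGo1]
          simpa [h] using ih.1 docs cur
      · intro docs acc
        by_cases h : p l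
        · simp only [List.foldl_cons, h, if_true, pvGo2]
          simpa [h] using ih.1 (docs ++ [PySem.Str.join "\n" (acc ++ [l])]) []
        · simp only [List.foldl_cons, h, pvGo2]
          simpa [h] using ih.2 docs (acc ++ [l])

-- B's index pairing equals the reference characterisation
theorem pvCastSucc (n : Nat) : ((n + 1 : Nat) : Int) = (n : Int) + 1 := by push_cast; ring

theorem pvPairChar (p : String → Bool) (ls : List String) :
    (∀ pre : List String,
      pvPairUp (pre ++ ls) (pvIdxs p (pre.length : Int) ls) = pvGo1 p ls)
    ∧ (∀ pre : List String, ∀ s : Nat, s ≤ pre.length →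
      pvAwait (pre ++ ls) (s : Int) (pvIdxs p (pre.length : Int) ls)
        = pvGo2 p (pre.drop s) ls) := by
  induction ls with
  | nil => simp [pvIdxs, pvPairUp, pvAwait, pvGo1, pvGo2]
  | cons l ls ih =>
      have hlen : ∀ pre : List String, (((pre ++ [l]).length : Nat) : Int) = (pre.length : Int) + 1 := by
        intro pre; simp
      have hdrop : ∀ (pre : List String) (s : Nat), s ≤ pre.length →
          (pre ++ [l]).drop s = pre.drop s ++ [l] := by
        intro pre s hs
        rw [List.drop_append]
        have : s - pre.length = 0 := by omega
        simp [this]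
      constructor
      · intro pre
        simp only [pvIdxs, pvGo1]
        by_cases h : p l
        · simp only [h, if_true]
          have h2 := ih.2 (pre ++ [l]) pre.length (by simp)
          rw [hlen, hdrop pre pre.length le_rfl, List.drop_length, List.nil_append,
            List.append_assoc, List.singleton_append] at h2
          simpa only [pvPairUp] using h2
        · simp only [h]
          have h1 := ih.1 (pre ++ [l])
          rw [hlen, List.append_assoc, List.singleton_append] at h1
          exact h1
      · intro pre s hs
        simp only [pvIdxs, pvGo2]
        by_cases h : p l
        · simp only [h, if_true, pvAwait]
          have hslice : PySem.List.slice (pre ++ l :: ls) (some (s : Int))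
              (some ((pre.length : Int) + 1)) = pre.drop s ++ [l] := by
            rw [← pvCastSucc, PySem.List.slice_natCast, List.drop_append]
            have hz : s - pre.length = 0 := by omega
            rw [hz]
            simp only [List.drop_zero]
            have hlen2 : pre.length + 1 - s = (pre.drop s).length + 1 := by
              simp [List.length_drop]; omega
            rw [hlen2, pvTakeLenSucc]
          rw [hslice]
          have h1 := ih.1 (pre ++ [l])
          rw [hlen, List.append_assoc, List.singleton_append] at h1
          rw [h1]
        · simp only [h]
          have h2 := ih.2 (pre ++ [l]) s (by simp; omega)
          rw [hlen, hdrop pre s hs, List.append_assoc, List.singleton_append] at h2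
          exact h2

-- ===== VERDICT (by name: the statement is the Claim_ definition above) =====
theorem extract_docstrings_spec : Claim_equal_extract_docstrings := by
  intro content _
  unfold Spec_extract_docstrings extract_docstrings extract_docstrings_alt
  dsimp only
  set p : String → Bool := fun line => PySem.Str.isIn "\"\"\"" (PySem.Str.strip line) with hp
  set lines := (PySem.Str.split? content "\n").getD [] with hl
  have hA := (pvFoldChar p lines).1 [] []
  have hB := (pvPairChar p lines).1 []
  simp only [List.length_nil, Nat.cast_zero, List.nil_append] at hA hB
  rw [pvFilterMap_enumerate p lines 0, hB, ← hA]
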